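-- pv_equiv track=rewrite | github.com/liqcui/ovnk-benchmark-mcp | elt/ovnk_benchmark_elt_json2table.py | _categorize_resource_type
-- ===== SOURCE A (Python) =====
-- def _categorize_resource_type(resource_name: str) -> str:
--     """Categorize resource type for better organization"""
--     resource_lower = resource_name.lower()
--
--     if any(keyword in resource_lower for keyword in ['network', 'policy', 'egress', 'udn']):
--         return 'Network & Security'
--     elif any(keyword in resource_lower for keyword in ['config', 'secret']):
--         return 'Configuration'
--     elif any(keyword in resource_lower for keyword in ['pod', 'service']):
--         return 'Workloads'
--     elif any(keyword in resource_lower for keyword in ['namespace']):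
--         return 'Organization'
--     else:
--         return 'Other'
-- ===== SOURCE B (Python) =====
-- _KEYWORD_PRIORITY = {
--     'network': 0, 'policy': 0, 'egress': 0, 'udn': 0,
--     'config': 1, 'secret': 1,
--     'pod': 2, 'service': 2,
--     'namespace': 3,
-- }
-- _CATEGORIES = ['Network & Security', 'Configuration', 'Workloads', 'Organization', 'Other']
--
--
-- def _categorize_resource_type(resource_name: str) -> str:
--     """Categorize by a single left-to-right scan over string positions,
--     keeping the minimum priority of any keyword that starts at a position."""
--     s = resource_name.lower()
--     best = len(_CATEGORIES) - 1
--     for i in range(len(s)):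
--         for keyword, priority in _KEYWORD_PRIORITY.items():
--             if priority < best and s.startswith(keyword, i):
--                 best = priority
--     return _CATEGORIES[best]
-- ===== Notes on version B (the rewrite author's own statement) =====
-- stated objective: alternative
-- what changed: Replaces the if/elif chain of whole-string substring membership tests by a single left-to-right scan over string positions that keeps the minimum priority of any keyword starting at each position, then indexes a category list by that priority.
import Mathlib
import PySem

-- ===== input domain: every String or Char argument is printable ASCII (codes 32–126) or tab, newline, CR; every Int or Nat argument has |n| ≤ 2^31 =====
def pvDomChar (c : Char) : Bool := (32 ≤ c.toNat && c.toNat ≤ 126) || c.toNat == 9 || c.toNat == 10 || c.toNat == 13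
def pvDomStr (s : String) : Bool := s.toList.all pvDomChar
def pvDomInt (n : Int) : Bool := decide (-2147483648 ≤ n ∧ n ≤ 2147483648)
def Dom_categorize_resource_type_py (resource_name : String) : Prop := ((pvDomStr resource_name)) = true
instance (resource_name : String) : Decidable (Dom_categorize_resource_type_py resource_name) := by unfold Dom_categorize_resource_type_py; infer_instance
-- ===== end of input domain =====

-- B replaces A's branch chain of whole-string substring tests by a single left-to-right scan over
-- string positions that keeps the minimum priority of any keyword starting at a position (alternative, same cost class).


-- ===== PORT A =====
def categorize_resource_type_py (resource_name : String) : String :=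
  let resource_lower := PySem.Str.lower resource_name
  if (["network", "policy", "egress", "udn"].any fun keyword => PySem.Str.isIn keyword resource_lower) then
    "Network & Security"
  else if (["config", "secret"].any fun keyword => PySem.Str.isIn keyword resource_lower) then
    "Configuration"
  else if (["pod", "service"].any fun keyword => PySem.Str.isIn keyword resource_lower) then
    "Workloads"
  else if (["namespace"].any fun keyword => PySem.Str.isIn keyword resource_lower) then
    "Organization"
  else
    "Other"

-- ===== PORT B =====
def pvKeywordPriority : List (List Char × Nat) :=
  [("network".toList, 0), ("policy".toList, 0), ("egress".toList, 0), ("udn".toList, 0),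
   ("config".toList, 1), ("secret".toList, 1),
   ("pod".toList, 2), ("service".toList, 2),
   ("namespace".toList, 3)]

def pvCategories : List String :=
  ["Network & Security", "Configuration", "Workloads", "Organization", "Other"]

-- Source B's `s.startswith(keyword, i)` with 0 ≤ i is exactly `keyword <+: s[i:]`, ported as
-- PySem.Chars.startswith (s.drop i) keyword; the final `_CATEGORIES[best]` (best always in range) as getD.
def categorize_resource_type_py_alt (resource_name : String) : String :=
  let s := (PySem.Str.lower resource_name).toList
  let best := (List.range s.length).foldl
    (fun best i => pvKeywordPriority.foldl
      (fun b kp => if kp.2 < b ∧ PySem.Chars.startswith (s.drop i) kp.1 then kp.2 else b) best)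
    (pvCategories.length - 1)
  pvCategories.getD best "Other"

-- ===== PRECONDITION & SPEC =====
def Spec_categorize_resource_type_py (resource_name : String) (out : String) : Prop := out = categorize_resource_type_py_alt resource_name
instance (resource_name : String) (out : String) : Decidable (Spec_categorize_resource_type_py resource_name out) := by unfold Spec_categorize_resource_type_py; infer_instance

-- ===== CLAIM (what is proved, stated in full; the proofs are below) =====
def Claim_equal_categorize_resource_type_py : Prop := ∀ (resource_name : String), Dom_categorize_resource_type_py resource_name → Spec_categorize_resource_type_py resource_name (categorize_resource_type_py resource_name)

-- ===== LEMMAS AND PROOFS =====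

-- hit kws s n: some keyword of kws starts at some position < n of s
def pvHit (kws : List (List Char)) (s : List Char) (n : Nat) : Bool :=
  (List.range n).any fun i => kws.any fun kw => PySem.Chars.startswith (s.drop i) kw

def pvRank (b0 b1 b2 b3 : Bool) : Nat :=
  if b0 then 0 else if b1 then 1 else if b2 then 2 else if b3 then 3 else 4

def pvG0 : List (List Char) := ["network".toList, "policy".toList, "egress".toList, "udn".toList]
def pvG1 : List (List Char) := ["config".toList, "secret".toList]
def pvG2 : List (List Char) := ["pod".toList, "service".toList]
def pvG3 : List (List Char) := ["namespace".toList]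

-- the keyword table is the four priority groups in order
lemma pvTable_eq :
    pvKeywordPriority
      = (pvG0.map (fun kw => (kw, 0))) ++ (pvG1.map (fun kw => (kw, 1)))
        ++ (pvG2.map (fun kw => (kw, 2))) ++ (pvG3.map (fun kw => (kw, 3))) := rfl

-- folding the step over one uniform-priority group
lemma pvGrp_fold (sw : List Char → Bool) (j : Nat) (kws : List (List Char)) (b : Nat) :
    (kws.map (fun kw => (kw, j))).foldl
        (fun b kp => if kp.2 < b ∧ sw kp.1 then kp.2 else b) b
      = if j < b ∧ kws.any sw then j else b := by
  induction kws generalizing b with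
  | nil => simp
  | cons hd tl ih =>
      simp only [List.map_cons, List.foldl_cons, List.any_cons, Bool.or_eq_true]
      rw [ih]
      by_cases hs : sw hd = true <;> by_cases hj : j < b <;>
        simp [hs, hj]

-- chaining the four group folds gives min with the rank of the group bools
lemma pvSeq4 (a0 a1 a2 a3 : Bool) (b : Nat) (hb : b ≤ 4) :
    (if 3 < (if 2 < (if 1 < (if 0 < b ∧ a0 then 0 else b) ∧ a1 then 1
        else (if 0 < b ∧ a0 then 0 else b)) ∧ a2 then 2
        else (if 1 < (if 0 < b ∧ a0 then 0 else b) ∧ a1 then 1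
        else (if 0 < b ∧ a0 then 0 else b))) ∧ a3 then 3
        else (if 2 < (if 1 < (if 0 < b ∧ a0 then 0 else b) ∧ a1 then 1
        else (if 0 < b ∧ a0 then 0 else b)) ∧ a2 then 2
        else (if 1 < (if 0 < b ∧ a0 then 0 else b) ∧ a1 then 1
        else (if 0 < b ∧ a0 then 0 else b))))
      = min b (pvRank a0 a1 a2 a3) := by
  cases a0 <;> cases a1 <;> cases a2 <;> cases a3 <;>
    simp [pvRank] <;> (try split_ifs) <;> omega

-- the inner (per-position) fold over the 9 concrete keywords, as a function of the 4 group bools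
lemma pvInner_eq (s : List Char) (i : Nat) (b : Nat) (hb : b ≤ 4) :
    pvKeywordPriority.foldl
      (fun b kp => if kp.2 < b ∧ PySem.Chars.startswith (s.drop i) kp.1 then kp.2 else b) b
    = min b (pvRank (pvG0.any fun kw => PySem.Chars.startswith (s.drop i) kw)
                    (pvG1.any fun kw => PySem.Chars.startswith (s.drop i) kw)
                    (pvG2.any fun kw => PySem.Chars.startswith (s.drop i) kw)
                    (pvG3.any fun kw => PySem.Chars.startswith (s.drop i) kw)) := by
  rw [pvTable_eq]
  rw [List.foldl_append, List.foldl_append, List.foldl_append]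
  rw [pvGrp_fold, pvGrp_fold, pvGrp_fold, pvGrp_fold]
  exact pvSeq4 _ _ _ _ b hb

lemma pvRank_le (a0 a1 a2 a3 : Bool) : pvRank a0 a1 a2 a3 ≤ 4 := by
  unfold pvRank; split_ifs <;> omega

lemma pvRank_min (a0 a1 a2 a3 b0 b1 b2 b3 : Bool) :
    min (pvRank a0 a1 a2 a3) (pvRank b0 b1 b2 b3)
      = pvRank (a0 || b0) (a1 || b1) (a2 || b2) (a3 || b3) := by
  cases a0 <;> cases a1 <;> cases a2 <;> cases a3 <;>
  cases b0 <;> cases b1 <;> cases b2 <;> cases b3 <;> simp [pvRank]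

lemma pvHit_succ (kws : List (List Char)) (s : List Char) (n : Nat) :
    pvHit kws s (n + 1)
      = (pvHit kws s n || kws.any fun kw => PySem.Chars.startswith (s.drop n) kw) := by
  simp [pvHit, List.range_succ]

-- the outer position loop computes the rank of the four "hit below n" bools
lemma pvOuter_eq (s : List Char) (n : Nat) :
    (List.range n).foldl
      (fun best i => pvKeywordPriority.foldl
        (fun b kp => if kp.2 < b ∧ PySem.Chars.startswith (s.drop i) kp.1 then kp.2 else b) best)
      4
    = pvRank (pvHit pvG0 s n) (pvHit pvG1 s n) (pvHit pvG2 s n) (pvHit pvG3 s n) := by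
  induction n with
  | zero => simp [pvHit, pvRank]
  | succ n ih =>
      rw [List.range_succ, List.foldl_append, ih]
      simp only [List.foldl_cons, List.foldl_nil]
      rw [pvInner_eq _ _ _ (pvRank_le _ _ _ _), pvRank_min, pvHit_succ, pvHit_succ,
        pvHit_succ, pvHit_succ]

-- a nonempty keyword occurs at some position < length iff it is a substring
lemma pvHit_eq_isIn (kws : List (List Char)) (h : ∀ kw ∈ kws, kw ≠ []) (s : List Char) :
    pvHit kws s s.length = kws.any fun kw => PySem.Chars.isIn kw s := by
  rw [Bool.eq_iff_iff]
  simp only [pvHit, List.any_eq_true, List.mem_range]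
  constructor
  · rintro ⟨i, -, kw, hkw, hsw⟩
    refine ⟨kw, hkw, ?_⟩
    rw [← PySem.Chars.exists_prefix_drop_iff_isIn]
    exact ⟨i, (PySem.Chars.startswith_iff _ _).mp hsw⟩
  · rintro ⟨kw, hkw, hin⟩
    obtain ⟨j, hj⟩ := (PySem.Chars.exists_prefix_drop_iff_isIn kw s).mpr hin
    have hjlt : j < s.length := by
      by_contra hle
      have hnil : s.drop j = [] := List.drop_eq_nil_of_le (by omega)
      rw [hnil, List.prefix_nil] at hj
      exact h kw hkw hj
    exact ⟨j, hjlt, kw, hkw, (PySem.Chars.startswith_iff _ _).mpr hj⟩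

-- the if/elif chain on the four group bools equals indexing the category list by their rank
lemma pvFinal_eq (g0 g1 g2 g3 : Bool) :
    (if g0 then "Network & Security"
     else if g1 then "Configuration"
     else if g2 then "Workloads"
     else if g3 then "Organization"
     else "Other")
      = pvCategories.getD (pvRank g0 g1 g2 g3) "Other" := by
  cases g0 <;> cases g1 <;> cases g2 <;> cases g3 <;> rfl

-- ===== VERDICT (by name: the statement is the Claim_ definition above) =====
theorem categorize_resource_type_py_spec : Claim_equal_categorize_resource_type_py := by
  intro resource_name _
  unfold Spec_categorize_resource_type_py
  show categorize_resource_type_py resource_name = categorize_resource_type_py_alt resource_name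
  simp only [categorize_resource_type_py, categorize_resource_type_py_alt,
    show pvCategories.length - 1 = 4 from rfl]
  rw [pvOuter_eq]
  rw [pvHit_eq_isIn pvG0 (by decide), pvHit_eq_isIn pvG1 (by decide),
      pvHit_eq_isIn pvG2 (by decide), pvHit_eq_isIn pvG3 (by decide)]
  simp only [pvG0, pvG1, pvG2, pvG3, List.any_cons, List.any_nil, Bool.or_false,
    PySem.Str.isIn_eq]
  exact pvFinal_eq _ _ _ _
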